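-- pv_equiv track=rewrite | github.com/mechaman111/spnati | opponents/monika/helper-scripts/csv2xml.py | format_stage_set
-- ===== SOURCE A (Python) =====
-- def format_interval(interval):
--     low, hi = interval
--     if low == hi:
--         return str(low)
--     else:
--         return str(low)+'-'+str(hi)
--
-- def format_stage_set(stage_set):
--     fragments = []
--     stages = []
--
--     for stage in stage_set:
--         try:
--             stages.append(int(stage))
--         except ValueError:
--             fragments.append(stage)
--
--     stages = sorted(stages)
--
--     while len(stages) > 0:
--         lo = stages[0]
--         hi_idx = 0
--
--         for i in range(1, len(stages)):
--             if stages[i] != lo+i: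
--                 break
--             hi_idx = i
--
--         hi = lo+hi_idx
--         fragments.append(format_interval((lo, hi)))
--
--         del stages[0:hi_idx+1]
--
--     return ','.join(fragments)
-- ===== SOURCE B (Python) =====
-- def format_interval(interval):
--     low, hi = interval
--     if low == hi:
--         return str(low)
--     else:
--         return str(low)+'-'+str(hi)
--
-- def format_stage_set(stage_set):
--     fragments = []
--     stages = []
--     for stage in stage_set:
--         try:
--             stages.append(int(stage))
--         except ValueError:
--             fragments.append(stage)
--     run = None  # current run (lo, hi), extended in one pass over the sorted stages
--     for x in sorted(stages):
--         if run is None: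
--             run = (x, x)
--         elif x == run[1] + 1:
--             run = (run[0], x)
--         else:
--             fragments.append(format_interval(run))
--             run = (x, x)
--     if run is not None:
--         fragments.append(format_interval(run))
--     return ','.join(fragments)
-- ===== Notes on version B (the rewrite author's own statement) =====
-- stated objective: alternative
-- what changed: Replaced A's while-loop that rescans the sorted list for a run and deletes its prefix (del stages[0:hi_idx+1]) each iteration with a single left-to-right fold over the sorted stages that keeps one current (lo,hi) run, extending or flushing it per element.
import Mathlib
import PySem

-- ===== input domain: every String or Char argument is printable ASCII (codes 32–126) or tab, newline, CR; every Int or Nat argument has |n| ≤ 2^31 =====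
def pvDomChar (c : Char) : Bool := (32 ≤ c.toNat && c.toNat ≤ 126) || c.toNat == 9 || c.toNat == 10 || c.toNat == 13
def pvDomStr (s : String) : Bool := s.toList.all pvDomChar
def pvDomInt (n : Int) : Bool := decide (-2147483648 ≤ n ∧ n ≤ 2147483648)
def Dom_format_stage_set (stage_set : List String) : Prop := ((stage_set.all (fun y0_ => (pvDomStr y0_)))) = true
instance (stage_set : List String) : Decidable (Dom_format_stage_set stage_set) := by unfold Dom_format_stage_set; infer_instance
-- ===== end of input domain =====

-- B replaces A's peel-a-run-and-delete while-loop by a single fold over the sorted stages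
-- that extends or flushes the current (lo,hi) run (objective: alternative single-pass algorithm).

-- ===== PORT A =====
-- shared module helper format_interval (used verbatim by both Pythons)
def format_interval (interval : Int × Int) : String :=
  if interval.1 = interval.2 then PySem.Int.toStr interval.1
  else PySem.Int.toStr interval.1 ++ "-" ++ PySem.Int.toStr interval.2

-- the inner 'for i in range(1, len(stages)): if stages[i] != lo+i: break; hi_idx = i':
-- counts how many leading elements continue the +1 chain (= final hi_idx)
def aHiIdx (v : Int) : List Int → Nat
  | [] => 0
  | x :: xs => if x = v + 1 then aHiIdx x xs + 1 else 0

-- the 'while len(stages) > 0' loop: emit the interval, delete stages[0:hi_idx+1]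
def aWhile (fragments : List String) : List Int → List String
  | [] => fragments
  | lo :: rest =>
    let hi_idx := aHiIdx lo rest
    aWhile (fragments ++ [format_interval (lo, lo + (hi_idx : Int))]) (rest.drop hi_idx)
  termination_by l => l.length
  decreasing_by simp [List.length_drop]

def format_stage_set (stage_set : List String) : String :=
  let init := stage_set.foldl (fun acc stage =>
      match PySem.Int.ofStr? stage with
      | some n => (acc.1, acc.2 ++ [n])
      | none => (acc.1 ++ [stage], acc.2)) (([] : List String), ([] : List Int))
  PySem.Str.join "," (aWhile init.1 (PySem.List.sorted init.2 (fun x => x) false))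

-- ===== PORT B =====
-- one step of B's single pass: extend the current run or close it and start a new one
def bStep (st : List String × Option (Int × Int)) (x : Int) : List String × Option (Int × Int) :=
  match st.2 with
  | none => (st.1, some (x, x))
  | some (lo, hi) =>
    if x = hi + 1 then (st.1, some (lo, x))
    else (st.1 ++ [format_interval (lo, hi)], some (x, x))

-- after the loop: flush the last open run, if any
def bFinish (st : List String × Option (Int × Int)) : List String :=
  match st.2 with
  | none => st.1
  | some r => st.1 ++ [format_interval r]

def format_stage_set_alt (stage_set : List String) : String :=
  let init := stage_set.foldl (fun acc stage =>
      match PySem.Int.ofStr? stage with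
      | some n => (acc.1, acc.2 ++ [n])
      | none => (acc.1 ++ [stage], acc.2)) (([] : List String), ([] : List Int))
  PySem.Str.join ","
    (bFinish ((PySem.List.sorted init.2 (fun x => x) false).foldl bStep (init.1, none)))

-- ===== PRECONDITION & SPEC =====
def Spec_format_stage_set (stage_set : List String) (out : String) : Prop := out = format_stage_set_alt stage_set
instance (stage_set : List String) (out : String) : Decidable (Spec_format_stage_set stage_set out) := by unfold Spec_format_stage_set; infer_instance

-- ===== CLAIM (what is proved, stated in full; the proofs are below) =====
def Claim_equal_format_stage_set : Prop := ∀ (stage_set : List String), Dom_format_stage_set stage_set → Spec_format_stage_set stage_set (format_stage_set stage_set)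

-- ===== LEMMAS AND PROOFS =====

lemma aWhile_nil (frags : List String) : aWhile frags [] = frags := by
  rw [aWhile]

lemma aWhile_cons (frags : List String) (lo : Int) (rest : List Int) :
    aWhile frags (lo :: rest) =
      aWhile (frags ++ [format_interval (lo, lo + (aHiIdx lo rest : Int))]) (rest.drop (aHiIdx lo rest)) := by
  rw [aWhile]

-- B's fold with an open run (lo, hi) behaves like A's loop after the run is maximally extended
lemma bFold_some (l : List Int) : ∀ (frags : List String) (lo hi : Int),
    bFinish (l.foldl bStep (frags, some (lo, hi))) =
      aWhile (frags ++ [format_interval (lo, hi + (aHiIdx hi l : Int))]) (l.drop (aHiIdx hi l)) := by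
  induction l with
  | nil => intro frags lo hi; simp [bFinish, aHiIdx, aWhile_nil]
  | cons x xs ih =>
    intro frags lo hi
    by_cases hx : x = hi + 1
    · have hstep : bStep (frags, some (lo, hi)) x = (frags, some (lo, x)) := by
        simp [bStep, hx]
      have h2 : aHiIdx hi (x :: xs) = aHiIdx x xs + 1 := by simp [aHiIdx, hx]
      have h1 : (hi + ((aHiIdx hi (x :: xs) : Nat) : Int)) = x + (aHiIdx x xs : Int) := by
        rw [h2]; push_cast; omega
      simp only [List.foldl_cons, hstep]
      rw [ih frags lo x, h1, h2]
      rfl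
    · have hstep : bStep (frags, some (lo, hi)) x = (frags ++ [format_interval (lo, hi)], some (x, x)) := by
        simp [bStep, hx]
      have h0 : aHiIdx hi (x :: xs) = 0 := by simp [aHiIdx, hx]
      simp only [List.foldl_cons, hstep]
      rw [ih (frags ++ [format_interval (lo, hi)]) x x, h0]
      simp only [Nat.cast_zero, add_zero, List.drop_zero]
      rw [aWhile_cons (frags ++ [format_interval (lo, hi)]) x xs, List.append_assoc]

-- B's whole pass equals A's while-loop, for any fragment prefix and any stage list
lemma bFold_none (l : List Int) (frags : List String) :
    bFinish (l.foldl bStep (frags, none)) = aWhile frags l := by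
  cases l with
  | nil => simp [bFinish, aWhile_nil]
  | cons x xs =>
    simp only [List.foldl_cons, bStep]
    rw [bFold_some xs frags x x, aWhile_cons frags x xs]

-- ===== VERDICT (by name: the statement is the Claim_ definition above) =====
theorem format_stage_set_spec : Claim_equal_format_stage_set := by
  intro stage_set _
  unfold Spec_format_stage_set format_stage_set format_stage_set_alt
  dsimp only
  rw [bFold_none]
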